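-- pv_equiv track=rewrite | github.com/Tuwaiq-Data-Science-Bootcamp-V2/Python-Lab5-Dictionary | Day5-Lab2-MunirahAlsahly.py | check_phone_number
-- ===== SOURCE A (Python) =====
-- def check_phone_number(phone_number):
--     symbols_flag = False
--     letters_flag = False
--     for i in phone_number:
--         if i in "!@#$%^&*()+=-_[]?><,.:":
--             symbols_flag=True
--         if i in "ABCDEFGHIJKLMNOPQRSTUVWXYZabcdefghijklmnopqrstuvwxyz":
--             letters_flag=True
--
--     return symbols_flag and letters_flag
-- ===== SOURCE B (Python) =====
-- SYMBOLS = "!@#$%^&*()+=-_[]?><,.:"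
-- LETTERS = "ABCDEFGHIJKLMNOPQRSTUVWXYZabcdefghijklmnopqrstuvwxyz"
--
--
-- def check_phone_number(phone_number):
--     # Inverted iteration: instead of scanning the input and classifying each
--     # character, scan each fixed character class and ask whether any of its
--     # members occurs in the input.
--     return any(s in phone_number for s in SYMBOLS) and any(
--         l in phone_number for l in LETTERS)
-- ===== Notes on version B (the rewrite author's own statement) =====
-- stated objective: simpler
-- what changed: Inverts the iteration: instead of one pass over the input carrying two boolean flags updated per character, B iterates over the two fixed class literals and tests each class character for membership in the input, short-circuiting via any().
import Mathlib
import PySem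

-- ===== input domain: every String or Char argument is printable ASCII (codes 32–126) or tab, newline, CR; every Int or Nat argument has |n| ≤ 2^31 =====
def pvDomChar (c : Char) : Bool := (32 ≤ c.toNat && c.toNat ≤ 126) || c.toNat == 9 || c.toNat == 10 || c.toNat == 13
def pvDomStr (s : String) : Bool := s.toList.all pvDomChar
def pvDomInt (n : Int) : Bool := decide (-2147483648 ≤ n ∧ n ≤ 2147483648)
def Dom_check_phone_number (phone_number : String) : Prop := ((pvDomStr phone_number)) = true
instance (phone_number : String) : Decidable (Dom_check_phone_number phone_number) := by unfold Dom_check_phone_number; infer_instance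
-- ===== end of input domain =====

-- ===== PORT A =====
-- B inverts the iteration (scans the two class literals and tests membership in the input) instead of A's flag-carrying pass over the input (simpler).
def check_phone_number (phone_number : String) : Bool :=
  let st := phone_number.toList.foldl (fun (st : Bool × Bool) i =>
    let st1 := if ("!@#$%^&*()+=-_[]?><,.:".toList).contains i then (true, st.2) else st
    if ("ABCDEFGHIJKLMNOPQRSTUVWXYZabcdefghijklmnopqrstuvwxyz".toList).contains i then (st1.1, true) else st1)
    (false, false)
  st.1 && st.2

-- ===== PORT B =====
-- 's in phone_number' for the single-character s is character membership in the input.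
def check_phone_number_alt (phone_number : String) : Bool :=
  ("!@#$%^&*()+=-_[]?><,.:".toList).any (fun s => phone_number.toList.contains s)
    && ("ABCDEFGHIJKLMNOPQRSTUVWXYZabcdefghijklmnopqrstuvwxyz".toList).any
        (fun l => phone_number.toList.contains l)

-- ===== PRECONDITION & SPEC =====
def Spec_check_phone_number (phone_number : String) (out : Bool) : Prop := out = check_phone_number_alt phone_number
instance (phone_number : String) (out : Bool) : Decidable (Spec_check_phone_number phone_number out) := by unfold Spec_check_phone_number; infer_instance

-- ===== CLAIM (what is proved, stated in full; the proofs are below) =====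
def Claim_equal_check_phone_number : Prop := ∀ (phone_number : String), Dom_check_phone_number phone_number → Spec_check_phone_number phone_number (check_phone_number phone_number)

-- ===== LEMMAS AND PROOFS =====

theorem cpn_foldl (p q : Char → Bool) (l : List Char) (a b : Bool) :
    l.foldl (fun (st : Bool × Bool) i =>
      let st1 := if p i then (true, st.2) else st
      if q i then (st1.1, true) else st1) (a, b)
    = (a || l.any p, b || l.any q) := by
  induction l generalizing a b with
  | nil => simp
  | cons x xs ih =>
    simp only [List.foldl_cons, List.any_cons]
    cases hp : p x <;> cases hq : q x <;> simp [ih]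

theorem cpn_any_comm (l m : List Char) :
    (l.any fun c => m.contains c) = (m.any fun c => l.contains c) := by
  rw [Bool.eq_iff_iff]
  simp only [List.any_eq_true, List.contains_eq_mem, decide_eq_true_eq]
  exact ⟨fun ⟨x, h1, h2⟩ => ⟨x, h2, h1⟩, fun ⟨x, h1, h2⟩ => ⟨x, h2, h1⟩⟩

-- ===== VERDICT (by name: the statement is the Claim_ definition above) =====
theorem check_phone_number_spec : Claim_equal_check_phone_number := by
  intro s _
  unfold Spec_check_phone_number check_phone_number check_phone_number_alt
  simp only [cpn_foldl, Bool.false_or, cpn_any_comm]
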